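-- pv_equiv track=rewrite | github.com/LawrenceHarkness/Projects | Python/Task1/GameFile/GameScore.py | HighScore
-- ===== SOURCE A (Python) =====
-- scores = []
--
-- names = []
--
-- def HighScore(names, scores):
--     HighScore = scores[0]
--
--     person_highscore = names[0]
--
--     for i in range(len(scores)):
--
--         if HighScore < scores[i]:
--             HighScore = scores[i]
--             person_highscore = names[i]
--     return HighScore , person_highscore
-- ===== SOURCE B (Python) =====
-- def HighScore(names, scores):
--     m = max(scores)
--     return m, names[scores.index(m)]
-- ===== Notes on version B (the rewrite author's own statement) =====
-- stated objective: idiomatic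
-- what changed: Replaces A's hand-written single tracking loop (running max plus carried name) by a max reduction followed by a first-occurrence index lookup (max + list.index), a two-pass decomposition with the same first-max tie semantics.
import Mathlib
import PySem

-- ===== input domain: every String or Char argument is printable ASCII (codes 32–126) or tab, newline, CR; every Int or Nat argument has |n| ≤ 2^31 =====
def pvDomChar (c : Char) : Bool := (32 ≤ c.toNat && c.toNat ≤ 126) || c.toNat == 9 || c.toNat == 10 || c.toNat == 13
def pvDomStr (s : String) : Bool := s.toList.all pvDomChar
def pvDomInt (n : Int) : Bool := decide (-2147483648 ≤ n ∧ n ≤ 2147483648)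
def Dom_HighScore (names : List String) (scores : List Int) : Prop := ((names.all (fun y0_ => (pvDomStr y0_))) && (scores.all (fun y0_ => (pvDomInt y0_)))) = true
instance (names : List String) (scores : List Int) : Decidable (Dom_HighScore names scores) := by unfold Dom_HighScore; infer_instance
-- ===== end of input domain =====

-- B replaces A's hand-written tracking loop by an idiomatic max reduction + first-occurrence index lookup; equivalence of the two decompositions is proved below.

-- ===== PORT A =====
-- loop body of A's for-loop; Option state: none = IndexError raised mid-loop
def stepA (names : List String) (scores : List Int) (st : Option (Int × String)) (i : Int) : Option (Int × String) :=
  match st with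
  | none => none
  | some (hs, p) =>
    match PySem.List.pyGet? scores i with
    | none => none
    | some si =>
      if hs < si then
        match PySem.List.pyGet? names i with
        | none => none
        | some ni => some (si, ni)
      else some (hs, p)

def HighScore (names : List String) (scores : List Int) : Int × String :=
  match PySem.List.pyGet? scores 0, PySem.List.pyGet? names 0 with
  | some hs0, some p0 =>
    match (PySem.List.pyRange 0 scores.length 1).foldl (stepA names scores) (some (hs0, p0)) with
    | some r => r
    | none => (0, "")
  | _, _ => (0, "")

-- ===== PORT B =====
def HighScore_alt (names : List String) (scores : List Int) : Int × String :=
  match PySem.List.max? scores (fun x => x) with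
  | none => (0, "")
  | some m =>
    match PySem.List.index? scores m with
    | none => (0, "")
    | some idx =>
      match PySem.List.pyGet? names (idx : Int) with
      | none => (0, "")
      | some nm => (m, nm)

-- ===== PRECONDITION & SPEC =====
-- Pre_ excludes exactly the inputs on which A raises IndexError: empty scores/names, and
-- inputs where a strict running maximum first occurs at an index past names' end (then the
-- loop reads names[i] out of range).  The third conjunct says: every index i beyond names'
-- length is NOT a new strict maximum (some earlier score is at least as large).
def Pre_HighScore (names : List String) (scores : List Int) : Prop :=
  scores ≠ [] ∧ names ≠ [] ∧
    ∀ i, (hi : i < scores.length) → names.length ≤ i →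
      ∃ j, j < i ∧ ∃ hj : j < scores.length, scores[i]'hi ≤ scores[j]'hj
instance (names : List String) (scores : List Int) : Decidable (Pre_HighScore names scores) := by unfold Pre_HighScore; infer_instance
def pvWitness_HighScore : List String × List Int := (["ann", "bob"], [3, 7])

def Spec_HighScore (names : List String) (scores : List Int) (out : Int × String) : Prop := out = HighScore_alt names scores
instance (names : List String) (scores : List Int) (out : Int × String) : Decidable (Spec_HighScore names scores out) := by unfold Spec_HighScore; infer_instance

-- ===== CLAIM (what is proved, stated in full; the proofs are below) =====
def Claim_equal_HighScore : Prop := ∀ (names : List String) (scores : List Int), Dom_HighScore names scores → Pre_HighScore names scores → Spec_HighScore names scores (HighScore names scores)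

-- ===== LEMMAS AND PROOFS =====

theorem loopA_eq (ys : List Int) : ∀ (names : List String), ys ≠ [] → names ≠ [] →
    (∀ i, (hi : i < ys.length) → names.length ≤ i →
      ∃ j, j < i ∧ ∃ hj : j < ys.length, ys[i]'hi ≤ ys[j]'hj) →
    (PySem.List.pyRange 0 ys.length 1).foldl (stepA names ys) (some (ys.headI, names.headI))
      = some (HighScore_alt names ys) := by
  induction ys using List.reverseRecOn with
  | nil => intro names h _ _; exact absurd rfl h
  | append_singleton ys y IH =>
    intro names _hne hnames Hp
    by_cases hys : ys = []
    · subst hys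
      obtain ⟨w, u, rfl⟩ := List.exists_cons_of_ne_nil hnames
      show (PySem.List.pyRange 0 ((1:Nat):Int) 1).foldl (stepA (w :: u) [y]) (some (y, w)) = _
      rw [show ((1:Nat):Int) = 0 + 1 by norm_num, PySem.List.pyRange_one_singleton]
      simp [stepA, HighScore_alt, PySem.List.max?_id_cons]
    · have Hp' : ∀ i, (hi : i < ys.length) → names.length ≤ i →
          ∃ j, j < i ∧ ∃ hj : j < ys.length, ys[i]'hi ≤ ys[j]'hj := by
        intro i hi hni
        have hi' : i < (ys ++ [y]).length := by simp; omega
        obtain ⟨j, hji, hj, hle⟩ := Hp i hi' hni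
        have hjy : j < ys.length := lt_trans hji hi
        refine ⟨j, hji, hjy, ?_⟩
        rwa [List.getElem_append_left hi, List.getElem_append_left hjy] at hle
      obtain ⟨z, t, rfl⟩ := List.exists_cons_of_ne_nil hys
      have hmaxle := PySem.List.le_foldl_max t z
      have hallle : ∀ k, (hk : k < (z :: t).length) → (z :: t)[k]'hk ≤ t.foldl max z := by
        intro k hk
        have hmem : (z :: t)[k]'hk ∈ z :: t := List.getElem_mem hk
        rcases List.mem_cons.1 hmem with h | h
        · rw [h]; exact hmaxle.1
        · exact hmaxle.2 _ h
      -- split the index range at the old length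
      have hcast : (((z :: t) ++ [y]).length : Int) = ((z :: t).length : Int) + 1 := by
        simp
      rw [hcast, PySem.List.pyRange_one_succ_right (by positivity), List.foldl_append]
      have hhead : ((z :: t) ++ [y]).headI = (z :: t).headI := rfl
      rw [hhead]
      -- on the prefix indices, the loop body over ys ++ [y] agrees with the body over ys
      have hpre : (PySem.List.pyRange 0 ((z :: t).length : Int) 1).foldl
            (stepA names ((z :: t) ++ [y])) (some ((z :: t).headI, names.headI))
          = (PySem.List.pyRange 0 ((z :: t).length : Int) 1).foldl
            (stepA names (z :: t)) (some ((z :: t).headI, names.headI)) := by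
        refine PySem.List.foldl_congr_mem _ _ _ _ (fun acc x hx => ?_)
        have hx' := (PySem.List.mem_pyRange_one).1 hx
        have hget : PySem.List.pyGet? ((z :: t) ++ [y]) x = PySem.List.pyGet? (z :: t) x := by
          rw [PySem.List.pyGet?_of_nonneg _ hx'.1, PySem.List.pyGet?_of_nonneg _ hx'.1,
              List.getElem?_append_left (by omega : x.toNat < (z :: t).length)]
        simp only [stepA, hget]
      rw [hpre, IH names hys hnames Hp']
      -- characterise HighScore_alt on the prefix
      have hmax : PySem.List.max? (z :: t) (fun x => x) = some (t.foldl max z) :=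
        PySem.List.max?_id_cons z t
      obtain ⟨idx, hidx⟩ : ∃ idx, PySem.List.index? (z :: t) (t.foldl max z) = some idx := by
        have hmem : t.foldl max z ∈ z :: t := by
          rcases PySem.List.foldl_max_mem t z with h | h
          · rw [h]; exact List.mem_cons_self
          · exact List.mem_cons_of_mem _ h
        exact Option.isSome_iff_exists.1 ((PySem.List.index?_isSome_iff _ _).2 hmem)
      obtain ⟨hidxlt, hidxval, hfirst⟩ := PySem.List.getElem_of_index?_eq_some hidx
      have hidxn : idx < names.length := by
        by_contra hcon
        push_neg at hcon
        have hlt1 : idx < t.length + 1 := by simpa using hidxlt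
        have hi : idx < (z :: t ++ [y]).length := by simp; omega
        obtain ⟨j, hji, hj, hle⟩ := Hp idx hi hcon
        have hjy : j < (z :: t).length := by simp; omega
        have hiy : idx < (z :: t).length := hidxlt
        rw [List.getElem_append_left hjy, List.getElem_append_left hiy, hidxval] at hle
        exact hfirst j hji (le_antisymm (hallle j hjy) hle)
      have hnameidx : PySem.List.pyGet? names (idx : Int) = some (names[idx]) := by
        rw [PySem.List.pyGet?_natCast, List.getElem?_eq_getElem hidxn]
      have hidx2 : List.idxOf? (t.foldl max z) (z :: t) = some idx := by
        rw [← PySem.List.index?_eq_idxOf?]; exact hidx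
      have halt : HighScore_alt names (z :: t) = (t.foldl max z, names[idx]) := by
        simp [HighScore_alt, hmax, hidx2, List.getElem?_eq_getElem hidxn]
      rw [halt]
      -- last iteration
      have hlast : PySem.List.pyGet? ((z :: t) ++ [y]) ((z :: t).length : Int) = some y :=
        PySem.List.pyGet?_append_length (z :: t) [] y
      simp only [List.cons_append, List.length_cons] at hlast
      push_cast at hlast
      by_cases hlt : t.foldl max z < y
      · -- new maximum at the appended position
        have hylen : t.length + 1 < names.length := by
          by_contra hcon
          push_neg at hcon
          have hi : t.length + 1 < (z :: t ++ [y]).length := by simp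
          obtain ⟨j, hji, hj, hle⟩ := Hp (t.length + 1) hi hcon
          have hjy : j < (z :: t).length := by simp; omega
          rw [List.getElem_append_left hjy] at hle
          have hY : (z :: t ++ [y])[t.length + 1]'hi = y := by
            rw [List.getElem_append_right (by simp : (z :: t).length ≤ t.length + 1)]
            simp
          rw [hY] at hle
          exact absurd (lt_of_lt_of_le hlt (le_trans hle (hallle j hjy))) (lt_irrefl _)
        have hnamelast : PySem.List.pyGet? names ((t.length : Int) + 1)
            = some (names[t.length + 1]'hylen) := by
          rw [show ((t.length : Int) + 1) = ((t.length + 1 : Nat) : Int) by push_cast; ring,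
              PySem.List.pyGet?_natCast, List.getElem?_eq_getElem hylen]
        have hnotmem : y ∉ z :: t := by
          intro hy
          rcases List.mem_cons.1 hy with rfl | hy'
          · exact absurd hlt (not_lt.2 hmaxle.1)
          · exact absurd hlt (not_lt.2 (hmaxle.2 _ hy'))
        have hmax' : PySem.List.max? (z :: (t ++ [y])) (fun x => x) = some y := by
          rw [PySem.List.max?_id_cons, List.foldl_append]
          simp [max_eq_right (le_of_lt hlt)]
        have hidx' : List.idxOf? y (z :: (t ++ [y])) = some (t.length + 1) := by
          rw [← PySem.List.index?_eq_idxOf?,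
              show z :: (t ++ [y]) = (z :: t) ++ [y] from rfl]
          simpa using PySem.List.index?_append_singleton_self (z :: t) y hnotmem
        simp [stepA, hlast, hlt, hnamelast, HighScore_alt, hmax', hidx']
      · -- old maximum stands
        have hmax' : PySem.List.max? (z :: (t ++ [y])) (fun x => x)
            = some (t.foldl max z) := by
          rw [PySem.List.max?_id_cons, List.foldl_append]
          simp [max_eq_left (not_lt.1 hlt)]
        have hmem : t.foldl max z ∈ z :: t := by
          rcases PySem.List.foldl_max_mem t z with h | h
          · rw [h]; exact List.mem_cons_self
          · exact List.mem_cons_of_mem _ h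
        have hidx' : List.idxOf? (t.foldl max z) (z :: (t ++ [y])) = some idx := by
          rw [← PySem.List.index?_eq_idxOf?,
              show z :: (t ++ [y]) = (z :: t) ++ [y] from rfl,
              PySem.List.index?_append_of_mem _ hmem, hidx]
        simp [stepA, hlast, hlt, HighScore_alt, hmax', hidx',
              List.getElem?_eq_getElem hidxn]

-- ===== VERDICT (by name: the statement is the Claim_ definition above) =====
theorem HighScore_spec : Claim_equal_HighScore := by
  intro names scores _hd hpre
  obtain ⟨hs, hn, hlen⟩ := hpre
  unfold Spec_HighScore HighScore
  obtain ⟨z, t, rfl⟩ := List.exists_cons_of_ne_nil hs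
  obtain ⟨w, u, rfl⟩ := List.exists_cons_of_ne_nil hn
  simp only [PySem.List.pyGet?_zero_cons]
  rw [show (some (z, w) : Option (Int × String)) = some ((z :: t).headI, (w :: u).headI) from rfl,
      loopA_eq (z :: t) (w :: u) (by simp) (by simp) hlen]
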